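-- pv_equiv track=rewrite | github.com/cwwang15/LDict-PCFG | scorer/monte-carlo.py | gen_guess_crack
-- ===== SOURCE A (Python) =====
-- def gen_guess_crack(estimations: [int], upper_bound=10 ** 20):
--     estimations.sort()
--     gc_pairs = {}
--     for idx, est in enumerate(estimations):
--         if est < upper_bound:
--             gc_pairs[est] = idx
--         else:
--             break
--     return list(gc_pairs.keys()), list(gc_pairs.values())
--     pass
-- ===== SOURCE B (Python) =====
-- def gen_guess_crack(estimations: [int], upper_bound=10 ** 20):
--     estimations.sort()
--     # Stage 1: run-length encode the sorted prefix strictly below the bound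
--     rle = []
--     for e in estimations:
--         if e >= upper_bound:
--             break
--         if rle and rle[-1][0] == e:
--             rle[-1][1] += 1
--         else:
--             rle.append([e, 1])
--     # Stage 2: last index of each distinct value = prefix sum of run lengths - 1
--     values = [v for v, _ in rle]
--     last = []
--     cum = 0
--     for _, c in rle:
--         cum += c
--         last.append(cum - 1)
--     return values, last
-- ===== Notes on version B (the rewrite author's own statement) =====
-- stated objective: alternative
-- what changed: Replaces A's dict built by per-element index overwrite (last index wins, keys() in insertion order) with a two-stage pass that never tracks indices while scanning: run-length encode the sorted below-bound prefix into (value, multiplicity) runs, then derive each value's last index as the running prefix sum of run lengths minus one.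
import Mathlib
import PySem

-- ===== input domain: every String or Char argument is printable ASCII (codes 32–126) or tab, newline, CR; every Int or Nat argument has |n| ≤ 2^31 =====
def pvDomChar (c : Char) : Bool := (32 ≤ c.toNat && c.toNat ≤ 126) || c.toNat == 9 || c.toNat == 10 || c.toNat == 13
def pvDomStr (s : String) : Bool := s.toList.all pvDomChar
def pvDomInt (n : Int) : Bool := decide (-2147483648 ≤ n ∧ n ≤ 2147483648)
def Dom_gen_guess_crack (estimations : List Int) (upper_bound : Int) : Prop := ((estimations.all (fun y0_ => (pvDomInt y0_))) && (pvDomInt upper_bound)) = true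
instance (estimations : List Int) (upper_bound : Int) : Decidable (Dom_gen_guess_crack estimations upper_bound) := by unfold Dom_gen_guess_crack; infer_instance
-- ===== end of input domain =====

-- B replaces A's dict-overwrite (last index wins) with a two-stage run-length-encode +
-- prefix-sum computation of last indices; both sort the input (the Python versions mutate
-- `estimations` in place; the equivalence proved here is about the return value).


-- ===== PORT A =====
-- the 'for idx, est in enumerate(estimations): … else: break' loop, state = gc_pairs
def gccLoop (ps : List (Int × Int)) (ub : Int) (d : PySem.Dict Int Int) : PySem.Dict Int Int :=
  match ps with
  | [] => d
  | (idx, est) :: rest => if est < ub then gccLoop rest ub (d.insert est idx) else d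

def gen_guess_crack (estimations : List Int) (upper_bound : Int) : List Int × List Int :=
  let s := PySem.List.sorted estimations (fun x => x) false   -- estimations.sort()
  let d := gccLoop (PySem.List.enumerate s 0) upper_bound PySem.Dict.empty
  (d.keys, d.values)

-- ===== PORT B =====
-- one step of Source B's RLE loop body: extend the last run or open a new one
def rleStep (rle : List (Int × Int)) (e : Int) : List (Int × Int) :=
  match rle.getLast? with        -- 'if rle and rle[-1][0] == e'
  | some (v, c) => if v = e then rle.dropLast ++ [(v, c + 1)] else rle ++ [(e, 1)]
  | none => [(e, 1)]

-- 'for e in estimations: if e >= upper_bound: break; …'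
def rleLoop (xs : List Int) (ub : Int) (rle : List (Int × Int)) : List (Int × Int) :=
  match xs with
  | [] => rle
  | e :: r => if e ≥ ub then rle else rleLoop r ub (rleStep rle e)

-- 'cum += c; last.append(cum - 1)'
def cumLoop : List (Int × Int) → Int → List Int
  | [], _ => []
  | (_, c) :: r, cum => (cum + c - 1) :: cumLoop r (cum + c)

def gen_guess_crack_alt (estimations : List Int) (upper_bound : Int) : List Int × List Int :=
  let s := PySem.List.sorted estimations (fun x => x) false   -- estimations.sort()
  let rle := rleLoop s upper_bound []
  (rle.map Prod.fst, cumLoop rle 0)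

-- ===== PRECONDITION & SPEC =====
def Spec_gen_guess_crack (estimations : List Int) (upper_bound : Int) (out : List Int × List Int) : Prop := out = gen_guess_crack_alt estimations upper_bound
instance (estimations : List Int) (upper_bound : Int) (out : List Int × List Int) : Decidable (Spec_gen_guess_crack estimations upper_bound out) := by unfold Spec_gen_guess_crack; infer_instance

-- ===== CLAIM (what is proved, stated in full; the proofs are below) =====
def Claim_equal_gen_guess_crack : Prop := ∀ (estimations : List Int) (upper_bound : Int), Dom_gen_guess_crack estimations upper_bound → Spec_gen_guess_crack estimations upper_bound (gen_guess_crack estimations upper_bound)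

-- ===== LEMMAS AND PROOFS =====

-- common description of both results: one (value, last-index) pair per run of equal values
def groupPairs : List Int → Int → List (Int × Int)
  | [], _ => []
  | x :: xs, i =>
    match xs with
    | [] => [(x, i)]
    | y :: _ => if y = x then groupPairs xs (i + 1) else (x, i) :: groupPairs xs (i + 1)

-- A's dict items after processing `p` starting from items `L` (overlap only possible at the seam)
def mergeAt (L G : List (Int × Int)) : List (Int × Int) :=
  if L.getLast?.map Prod.fst = G.head?.map Prod.fst ∧ G ≠ [] then L.dropLast ++ G else L ++ G

-- A's loop with the break already eliminated
def insAll (ps : List (Int × Int)) (d : PySem.Dict Int Int) : PySem.Dict Int Int :=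
  match ps with
  | [] => d
  | (i, e) :: r => insAll r (d.insert e i)

-- B's RLE of the remaining list, given the current open run (value v, count c)
def rleGo : Int → Int → List Int → List (Int × Int)
  | v, c, [] => [(v, c)]
  | v, c, x :: xs => if x = v then rleGo v (c + 1) xs else (v, c) :: rleGo x 1 xs

lemma gp_head (xs : List Int) : ∀ (x : Int) (i : Int), ∃ j, (groupPairs (x :: xs) i).head? = some (x, j) := by
  induction xs with
  | nil => intro x i; exact ⟨i, rfl⟩
  | cons y t ih =>
    intro x i
    by_cases h : y = x
    · obtain ⟨j, hj⟩ := ih y (i + 1)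
      exact ⟨j, by simpa [groupPairs, h] using hj⟩
    · exact ⟨i, by simp [groupPairs, h]⟩

lemma gccLoop_eq_insAll (s : List Int) : ∀ (i ub : Int) (d : PySem.Dict Int Int),
    gccLoop (PySem.List.enumerate s i) ub d
      = insAll (PySem.List.enumerate (s.takeWhile (fun e => decide (e < ub))) i) d := by
  induction s with
  | nil => intro i ub d; simp [gccLoop, insAll, PySem.List.enumerate_nil]
  | cons x xs ih =>
    intro i ub d
    by_cases h : x < ub
    · simp [PySem.List.enumerate_cons, gccLoop, h, insAll, ih]
    · simp [PySem.List.enumerate_cons, gccLoop, h, insAll]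

lemma last_key_of_mem (L : List (Int × Int)) (x : Int)
    (hp : (L.map Prod.fst).Pairwise (· < ·)) (hle : ∀ q ∈ L, q.1 ≤ x) (hx : x ∈ L.map Prod.fst) :
    ∃ L' j, L = L' ++ [(x, j)] ∧ ∀ q ∈ L', q.1 ≠ x := by
  rcases List.eq_nil_or_concat L with rfl | ⟨L', a, hL⟩
  · simp at hx
  · rw [List.concat_eq_append] at hL
    subst hL
    have hkeys : (L'.map Prod.fst).Pairwise (· < ·) ∧ ∀ q ∈ L', q.1 < a.1 := by
      have := hp
      simp only [List.map_append, List.map_cons, List.map_nil, List.pairwise_append] at this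
      refine ⟨this.1, fun q hq => ?_⟩
      exact this.2.2 q.1 (List.mem_map_of_mem hq) a.1 (by simp)
    have hax : a.1 = x := by
      have ha1 : a.1 ≤ x := hle a (by simp)
      rcases (by simpa using hx : x ∈ L'.map Prod.fst ∨ x = a.1) with hx' | rfl
      · obtain ⟨q, hq, hq1⟩ := List.mem_map.mp hx'
        have := hkeys.2 q hq
        omega
      · rfl
    refine ⟨L', a.2, by simp [← hax], fun q hq => ?_⟩
    have := hkeys.2 q hq
    omega

lemma last_key_ne (L : List (Int × Int)) (x : Int) (hlt : ∀ q ∈ L, q.1 ≠ x) :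
    L.getLast?.map Prod.fst ≠ some x := by
  cases hL : L.getLast? with
  | none => simp
  | some a =>
    have ha : a ∈ L := List.mem_of_getLast? hL
    simpa using hlt a ha

lemma insAll_items (p : List Int) : ∀ (i : Int) (L : List (Int × Int)),
    p.Pairwise (· ≤ ·) →
    (L.map Prod.fst).Pairwise (· < ·) →
    (∀ q ∈ L, ∀ x ∈ p, q.1 ≤ x) →
    (insAll (PySem.List.enumerate p i) ⟨L⟩).items = mergeAt L (groupPairs p i) := by
  induction p with
  | nil => intro i L _ _ _; simp [PySem.List.enumerate_nil, insAll, mergeAt, groupPairs]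
  | cons x xs ih =>
    intro i L hsort hkeys hle
    rcases List.pairwise_cons.mp hsort with ⟨hxle, hxs⟩
    rw [PySem.List.enumerate_cons]
    show (insAll (PySem.List.enumerate xs (i + 1)) ((PySem.Dict.mk L).insert x i)).items
        = mergeAt L (groupPairs (x :: xs) i)
    by_cases hmem : x ∈ L.map Prod.fst
    · -- overwrite in place: x is the LAST key of L
      obtain ⟨L', j, rfl, hne⟩ := last_key_of_mem L x hkeys (fun q hq => hle q hq x (by simp)) hmem
      have hins : (PySem.Dict.mk (L' ++ [(x, j)])).insert x i = PySem.Dict.mk (L' ++ [(x, i)]) := by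
        have hc : (PySem.Dict.mk (L' ++ [(x, j)])).contains x = true := by
          simp [PySem.Dict.contains]
        simp only [PySem.Dict.insert, hc, if_true]
        congr 1
        rw [List.map_append]
        congr 1
        · rw [List.map_congr_left (g := id) (fun q hq => by simp [hne q hq]), List.map_id]
        · simp
      rw [hins]
      have hkeys' : ((L' ++ [(x, i)]).map Prod.fst).Pairwise (· < ·) := by simpa using hkeys
      have hle' : ∀ q ∈ L' ++ [(x, i)], ∀ y ∈ xs, q.1 ≤ y := by
        intro q hq y hy
        rcases List.mem_append.mp hq with hq' | hq'
        · exact hle q (by simp [hq']) y (by simp [hy])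
        · simp at hq'; simp [hq']; exact hxle y hy
      rw [ih (i + 1) (L' ++ [(x, i)]) hxs hkeys' hle']
      have hLne : (L' ++ [(x, j)]).getLast?.map Prod.fst = some x := by
        rw [List.getLast?_concat]; rfl
      have hLne' : (L' ++ [(x, i)]).getLast?.map Prod.fst = some x := by
        rw [List.getLast?_concat]; rfl
      cases xs with
      | nil =>
        rw [show groupPairs ([] : List Int) (i + 1) = [] from rfl,
            show groupPairs [x] i = [(x, i)] from rfl]
        rw [mergeAt, mergeAt, if_neg (by simp), if_pos (by simp)]
        simp
      | cons y t =>
        obtain ⟨k, hk⟩ := gp_head t y (i + 1)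
        by_cases hyx : y = x
        · rw [show groupPairs (x :: y :: t) i = groupPairs (y :: t) (i + 1) by
            simp [groupPairs, hyx]]
          have hGne : groupPairs (y :: t) (i + 1) ≠ [] := by
            intro h; rw [h] at hk; simp at hk
          have hGh : (groupPairs (y :: t) (i + 1)).head?.map Prod.fst = some x := by
            rw [hk]; simp [hyx]
          rw [mergeAt, mergeAt, if_pos ⟨by rw [hLne', hGh], hGne⟩,
              if_pos ⟨by rw [hLne, hGh], hGne⟩]
          simp
        · rw [show groupPairs (x :: y :: t) i = (x, i) :: groupPairs (y :: t) (i + 1) by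
            simp [groupPairs, hyx]]
          have hGh : (groupPairs (y :: t) (i + 1)).head?.map Prod.fst = some y := by
            rw [hk]; rfl
          rw [mergeAt, mergeAt,
              if_neg (by rw [hLne', hGh]; simp [Ne.symm hyx]),
              if_pos ⟨by rw [hLne]; simp, by simp⟩]
          simp
    · -- new key: append at the end
      have hins : (PySem.Dict.mk L).insert x i = PySem.Dict.mk (L ++ [(x, i)]) := by
        have hc : (PySem.Dict.mk L).contains x = false := by
          simp only [PySem.Dict.contains, List.any_eq_false]
          intro q hq
          simp only [beq_iff_eq]
          intro h
          exact hmem (h ▸ List.mem_map_of_mem hq)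
        simp [PySem.Dict.insert, hc]
      rw [hins]
      have hlt : ∀ q ∈ L, q.1 < x := by
        intro q hq
        have h1 : q.1 ≤ x := hle q hq x (by simp)
        have h2 : q.1 ≠ x := fun h => hmem (h ▸ List.mem_map_of_mem hq)
        omega
      have hLx : L.getLast?.map Prod.fst ≠ some x :=
        last_key_ne L x (fun q hq => by have := hlt q hq; omega)
      have hkeys' : ((L ++ [(x, i)]).map Prod.fst).Pairwise (· < ·) := by
        rw [List.map_append, List.pairwise_append]
        refine ⟨hkeys, by simp, ?_⟩
        intro a ha b hb
        simp only [List.map_cons, List.map_nil, List.mem_cons, List.not_mem_nil, or_false] at hb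
        obtain ⟨q, hq, rfl⟩ := List.mem_map.mp ha
        exact hb ▸ hlt q hq
      have hle' : ∀ q ∈ L ++ [(x, i)], ∀ y ∈ xs, q.1 ≤ y := by
        intro q hq y hy
        rcases List.mem_append.mp hq with hq' | hq'
        · exact hle q hq' y (by simp [hy])
        · simp at hq'; simp [hq']; exact hxle y hy
      rw [ih (i + 1) (L ++ [(x, i)]) hxs hkeys' hle']
      have hLne' : (L ++ [(x, i)]).getLast?.map Prod.fst = some x := by
        rw [List.getLast?_concat]; rfl
      cases xs with
      | nil =>
        rw [show groupPairs ([] : List Int) (i + 1) = [] from rfl,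
            show groupPairs [x] i = [(x, i)] from rfl]
        rw [mergeAt, mergeAt, if_neg (by simp), if_neg (by simp [hLx])]
        simp
      | cons y t =>
        obtain ⟨k, hk⟩ := gp_head t y (i + 1)
        by_cases hyx : y = x
        · rw [show groupPairs (x :: y :: t) i = groupPairs (y :: t) (i + 1) by
            simp [groupPairs, hyx]]
          have hGne : groupPairs (y :: t) (i + 1) ≠ [] := by
            intro h; rw [h] at hk; simp at hk
          have hGh : (groupPairs (y :: t) (i + 1)).head?.map Prod.fst = some x := by
            rw [hk]; simp [hyx]
          rw [mergeAt, mergeAt, if_pos ⟨by rw [hLne', hGh], hGne⟩,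
              if_neg (by rw [hGh]; simp [hLx])]
          simp
        · rw [show groupPairs (x :: y :: t) i = (x, i) :: groupPairs (y :: t) (i + 1) by
            simp [groupPairs, hyx]]
          have hGh : (groupPairs (y :: t) (i + 1)).head?.map Prod.fst = some y := by
            rw [hk]; rfl
          rw [mergeAt, mergeAt,
              if_neg (by rw [hLne', hGh]; simp [Ne.symm hyx]),
              if_neg (by simp [hLx])]
          simp

-- B's break loop = a fold of rleStep over the takeWhile prefix
lemma rleLoop_eq_foldl (xs : List Int) : ∀ (ub : Int) (r : List (Int × Int)),
    rleLoop xs ub r = (xs.takeWhile (fun e => decide (e < ub))).foldl rleStep r := by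
  induction xs with
  | nil => intro ub r; simp [rleLoop]
  | cons x t ih =>
    intro ub r
    by_cases h : x < ub
    · have : ¬ x ≥ ub := by omega
      simp [rleLoop, this, h, ih]
    · have : x ≥ ub := by omega
      simp [rleLoop, this, h]

-- the fold with a non-empty accumulator only touches the last run
lemma foldl_rleStep (xs : List Int) : ∀ (R : List (Int × Int)) (v c : Int),
    List.foldl rleStep (R ++ [(v, c)]) xs = R ++ rleGo v c xs := by
  induction xs with
  | nil => intro R v c; simp [rleGo]
  | cons x t ih =>
    intro R v c
    have hstep : rleStep (R ++ [(v, c)]) x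
        = if x = v then R ++ [(v, c + 1)] else (R ++ [(v, c)]) ++ [(x, 1)] := by
      rw [rleStep, List.getLast?_concat]
      by_cases h : x = v
      · subst h; simp
      · have h' : ¬ v = x := fun hv => h hv.symm
        simp [h, h']
    by_cases h : x = v
    · rw [List.foldl_cons, hstep, if_pos h, ih, rleGo, if_pos h]
    · rw [List.foldl_cons, hstep, if_neg h, ih, rleGo, if_neg h, List.append_assoc]
      rfl

-- the RLE values and the prefix-sum last indices coincide with groupPairs
lemma rleGo_groupPairs (xs : List Int) : ∀ (x c i : Int),
    (rleGo x c xs).map Prod.fst = (groupPairs (x :: xs) i).map Prod.fst ∧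
    cumLoop (rleGo x c xs) (i - c + 1) = (groupPairs (x :: xs) i).map Prod.snd := by
  induction xs with
  | nil =>
    intro x c i
    constructor
    · rfl
    · show [(i - c + 1) + c - 1] = [i]
      congr 1; omega
  | cons y t ih =>
    intro x c i
    by_cases h : y = x
    · subst h
      have h1 : rleGo y c (y :: t) = rleGo y (c + 1) t := by rw [rleGo, if_pos rfl]
      have h2 : groupPairs (y :: y :: t) i = groupPairs (y :: t) (i + 1) := by
        simp [groupPairs]
      obtain ⟨ha, hb⟩ := ih y (c + 1) (i + 1)
      refine ⟨by rw [h1, h2, ha], ?_⟩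
      rw [h1, h2]
      have : i - c + 1 = (i + 1) - (c + 1) + 1 := by omega
      rw [this, hb]
    · have h1 : rleGo x c (y :: t) = (x, c) :: rleGo y 1 t := by rw [rleGo, if_neg h]
      have h2 : groupPairs (x :: y :: t) i = (x, i) :: groupPairs (y :: t) (i + 1) := by
        simp [groupPairs, h]
      obtain ⟨ha, hb⟩ := ih y 1 (i + 1)
      refine ⟨?_, ?_⟩
      · rw [h1, h2, List.map_cons, List.map_cons, ha]
      · rw [h1, h2]
        show ((i - c + 1) + c - 1) :: cumLoop (rleGo y 1 t) ((i - c + 1) + c)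
            = i :: (groupPairs (y :: t) (i + 1)).map Prod.snd
        have e1 : (i - c + 1) + c - 1 = i := by omega
        have e2 : (i - c + 1) + c = (i + 1) - 1 + 1 := by omega
        rw [e1, e2, hb]

-- ===== VERDICT (by name: the statement is the Claim_ definition above) =====
theorem gen_guess_crack_spec : Claim_equal_gen_guess_crack := by
  intro estimations upper_bound _
  unfold Spec_gen_guess_crack gen_guess_crack gen_guess_crack_alt
  simp only []
  set s := PySem.List.sorted estimations (fun x => x) false with hs
  have hsort : s.Pairwise (· ≤ ·) := PySem.List.sorted_pairwise estimations (fun x => x)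
  set p := s.takeWhile (fun e => decide (e < upper_bound)) with hp
  have hpsort : p.Pairwise (· ≤ ·) := hsort.sublist (List.takeWhile_sublist _)
  have hA : (gccLoop (PySem.List.enumerate s 0) upper_bound PySem.Dict.empty).items
      = groupPairs p 0 := by
    rw [gccLoop_eq_insAll, ← hp]
    have := insAll_items p 0 [] hpsort (by simp) (by simp)
    rw [show (PySem.Dict.empty : PySem.Dict Int Int) = PySem.Dict.mk [] from rfl]
    rw [this]
    simp [mergeAt]
  have hB : cumLoop (rleLoop s upper_bound []) 0 = (groupPairs p 0).map Prod.snd ∧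
      (rleLoop s upper_bound []).map Prod.fst = (groupPairs p 0).map Prod.fst := by
    rw [rleLoop_eq_foldl, ← hp]
    cases hc : p with
    | nil => simp [groupPairs, cumLoop]
    | cons x t =>
      have hfold : List.foldl rleStep [] (x :: t) = rleGo x 1 t := by
        rw [List.foldl_cons, show rleStep [] x = [(x, 1)] from rfl,
            show ([(x, 1)] : List (Int × Int)) = [] ++ [(x, 1)] from rfl, foldl_rleStep]
        rfl
      obtain ⟨ha, hb⟩ := rleGo_groupPairs t x 1 0
      have hb0 : cumLoop (rleGo x 1 t) 0 = (groupPairs (x :: t) 0).map Prod.snd := by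
        rw [show (0 : Int) = 0 - 1 + 1 by omega]
        exact hb
      exact ⟨by rw [hfold, hb0], by rw [hfold, ha]⟩
  rw [PySem.Dict.keys, PySem.Dict.values, hA]
  exact Prod.ext hB.2.symm hB.1.symm
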